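-- pv_equiv track=rewrite | github.com/YerevaNN/3DMolGen | tests/evaluation/posebusters_check_tests/test_posebusters.py | _build_conformer_payload
-- ===== SOURCE A (Python) =====
-- from typing import Callable, Dict, List, Optional, Sequence, Tuple
--
-- def _build_conformer_payload(
--     smiles_counts: Sequence[Tuple[str, int]]
-- ) -> Dict[str, List[str]]:
--     """Return placeholder conformer lists for each SMILES in order."""
--     payload: Dict[str, List[str]] = {}
--     next_idx = 0
--     for smiles, count in smiles_counts:
--         payload[smiles] = [
--             f"mol_{idx}" for idx in range(next_idx, next_idx + count)
--         ]
--         next_idx += count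
--     return payload
-- ===== SOURCE B (Python) =====
-- from typing import Dict, List, Sequence, Tuple
--
-- def _build_conformer_payload(
--     smiles_counts: Sequence[Tuple[str, int]]
-- ) -> Dict[str, List[str]]:
--     """Return placeholder conformer lists for each SMILES in order."""
--     def build(seg, start):
--         # dict for the entries of seg, whose ids begin at index `start`
--         if not seg:
--             return {}
--         if len(seg) == 1:
--             smiles, count = seg[0]
--             return {smiles: [f"mol_{i}" for i in range(start, start + count)]}
--         mid = len(seg) // 2
--         left = build(seg[:mid], start)
--         left.update(build(seg[mid:], start + sum(c for _, c in seg[:mid])))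
--         return left
--     return build(list(smiles_counts), 0)
-- ===== Notes on version B (the rewrite author's own statement) =====
-- stated objective: alternative
-- what changed: Replaces the single left-to-right loop threading a mutable dict and a running next_idx counter by a divide-and-conquer recursion: split the list in half, build each half's dict independently (the right half starting at start + sum of the left half's counts) and merge with dict.update, which reproduces duplicate-key overwrite semantics.
import Mathlib
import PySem

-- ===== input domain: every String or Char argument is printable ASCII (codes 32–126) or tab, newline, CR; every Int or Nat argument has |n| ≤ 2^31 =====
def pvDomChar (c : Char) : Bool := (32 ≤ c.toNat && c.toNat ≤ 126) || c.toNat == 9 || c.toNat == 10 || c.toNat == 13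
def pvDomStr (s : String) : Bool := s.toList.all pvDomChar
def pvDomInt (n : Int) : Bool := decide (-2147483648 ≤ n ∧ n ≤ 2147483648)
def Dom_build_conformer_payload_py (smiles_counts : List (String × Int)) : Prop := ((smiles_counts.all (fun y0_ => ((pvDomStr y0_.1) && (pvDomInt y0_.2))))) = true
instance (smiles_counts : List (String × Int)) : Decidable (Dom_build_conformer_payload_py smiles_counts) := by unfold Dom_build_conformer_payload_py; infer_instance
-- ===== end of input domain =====

-- B replaces A's single left-to-right loop (mutable dict + running next_idx counter) by a
-- divide-and-conquer recursion: build each half's dict and merge with dict.update; same value.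

-- the id comprehension [f"mol_{idx}" for idx in range(a, b)] (both Pythons contain it verbatim)
def molIds (a b : Int) : List String :=
  (PySem.List.pyRange a b 1).map (fun i => "mol_" ++ PySem.Int.toStr i)

-- ===== PORT A =====
def build_conformer_payload_py (smiles_counts : List (String × Int)) : List (String × List String) :=
  (smiles_counts.foldl
      (fun (st : PySem.Dict String (List String) × Int) p =>
        (st.1.insert p.1 (molIds st.2 (st.2 + p.2)), st.2 + p.2))
      (PySem.Dict.empty, 0)).1.items

-- ===== PORT B =====
-- sum(c for _, c in seg[:mid])
def bcpSum (l : List (String × Int)) : Int := (l.map (·.2)).sum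

-- def build(seg, start): divide and conquer with dict.update merging
def bcpBuild : List (String × Int) → Int → PySem.Dict String (List String)
  | [], _ => PySem.Dict.empty
  | [p], start => PySem.Dict.empty.insert p.1 (molIds start (start + p.2))
  | p1 :: p2 :: t, start =>
      let mid := (p1 :: p2 :: t).length / 2
      (bcpBuild ((p1 :: p2 :: t).take mid) start).update
        (bcpBuild ((p1 :: p2 :: t).drop mid)
          (start + bcpSum ((p1 :: p2 :: t).take mid))).items
termination_by l _ => l.length
decreasing_by
  · simp [List.length_take]; omega
  · simp [List.length_drop]; omega

def build_conformer_payload_py_alt (smiles_counts : List (String × Int)) : List (String × List String) :=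
  (bcpBuild smiles_counts 0).items

-- ===== PRECONDITION & SPEC =====
def Spec_build_conformer_payload_py (smiles_counts : List (String × Int)) (out : List (String × List String)) : Prop := out = build_conformer_payload_py_alt smiles_counts
instance (smiles_counts : List (String × Int)) (out : List (String × List String)) : Decidable (Spec_build_conformer_payload_py smiles_counts out) := by unfold Spec_build_conformer_payload_py; infer_instance

-- ===== CLAIM (what is proved, stated in full; the proofs are below) =====
def Claim_equal_build_conformer_payload_py : Prop := ∀ (smiles_counts : List (String × Int)), Dom_build_conformer_payload_py smiles_counts → Spec_build_conformer_payload_py smiles_counts (build_conformer_payload_py smiles_counts)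

-- ===== LEMMAS AND PROOFS =====

-- the flat per-entry pair list both programs' dicts are built from
def flatPairs : List (String × Int) → Int → List (String × List String)
  | [], _ => []
  | p :: t, n => (p.1, molIds n (n + p.2)) :: flatPairs t (n + p.2)

-- last-match lookup in a raw pair list
def lookLast {ν : Type} (qs : List (String × ν)) (j : String) : Option ν :=
  match qs with
  | [] => none
  | p :: t => (lookLast t j).or (if p.1 == j then some p.2 else none)

lemma flatPairs_append (l1 l2 : List (String × Int)) (n : Int) :
    flatPairs (l1 ++ l2) n = flatPairs l1 n ++ flatPairs l2 (n + bcpSum l1) := by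
  induction l1 generalizing n with
  | nil => simp [flatPairs, bcpSum]
  | cons p t ih => simp [flatPairs, bcpSum, ih, add_assoc]

-- A's loop equals folding the flat pair list into the dict
lemma A_loop_eq (l : List (String × Int)) (d : PySem.Dict String (List String)) (n : Int) :
    (l.foldl
        (fun (st : PySem.Dict String (List String) × Int) p =>
          (st.1.insert p.1 (molIds st.2 (st.2 + p.2)), st.2 + p.2))
        (d, n)).1 = d.update (flatPairs l n) := by
  induction l generalizing d n with
  | nil => rfl
  | cons p t ih => simpa [flatPairs, PySem.Dict.update] using ih (d.insert p.1 (molIds n (n + p.2))) (n + p.2)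

lemma get?_update {ν : Type} (qs : List (String × ν)) (d : PySem.Dict String ν) (j : String) :
    (d.update qs).get? j = (lookLast qs j).or (d.get? j) := by
  induction qs generalizing d with
  | nil => rfl
  | cons p t ih =>
      show ((d.insert p.1 p.2).update t).get? j = _
      rw [ih, lookLast, Option.or_assoc, PySem.Dict.get?_insert]
      cases h : lookLast t j with
      | some v => rfl
      | none =>
          simp only [Option.or]
          by_cases hj : j = p.1
          · simp [hj]
          · simp [hj, Ne.symm hj, beq_iff_eq]

-- on a dict with nodup keys, last-match lookup over the items is get?
lemma lookLast_items {ν : Type} (d : PySem.Dict String ν) (hd : d.keys.Nodup) (j : String) :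
    lookLast d.items j = d.get? j := by
  obtain ⟨l⟩ := d
  induction l with
  | nil => rfl
  | cons p t ih =>
      simp only [PySem.Dict.keys, List.map_cons, List.nodup_cons] at hd
      rw [show (PySem.Dict.mk (p :: t) : PySem.Dict String ν).items = p :: t from rfl,
          lookLast, PySem.Dict.get?_mk_cons]
      rw [show (PySem.Dict.mk t : PySem.Dict String ν).items = t from rfl] at ih
      rw [ih hd.2]
      by_cases hj : p.1 = j
      · subst hj
        have hz : (PySem.Dict.mk t : PySem.Dict String ν).get? p.1 = none := by
          rw [PySem.Dict.get?_eq_none_iff_not_mem_keys]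
          simpa [PySem.Dict.keys] using hd.1
        simp [hz]
      · simp only [beq_iff_eq, hj, if_false]
        cases (PySem.Dict.mk t : PySem.Dict String ν).get? j <;> rfl

lemma keys_update {ν : Type} (qs : List (String × ν)) (d : PySem.Dict String ν) :
    (d.update qs).keys = PySem.Set.update d.keys (qs.map (·.1)) := by
  have := PySem.Dict.keys_foldl_insert_key (l := qs) (key := fun p => p.1)
    (f := fun _ p => p.2) (d := d)
  simpa [PySem.Dict.update] using this

lemma nodup_keys_update' {ν : Type} (qs : List (String × ν)) (d : PySem.Dict String ν)
    (h : d.keys.Nodup) : (d.update qs).keys.Nodup := by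
  rw [keys_update]
  exact PySem.Set.nodup_update _ _ h

-- two dicts with nodup keys, equal key lists and equal lookups are equal
lemma dict_ext_of {ν : Type} (d1 d2 : PySem.Dict String ν) (dflt : ν)
    (h1 : d1.keys.Nodup) (hk : d1.keys = d2.keys) (hg : ∀ j, d1.get? j = d2.get? j) :
    d1 = d2 := by
  apply PySem.Dict.ext
  rw [PySem.Dict.items_eq_map_keys d1 h1 dflt, PySem.Dict.items_eq_map_keys d2 (hk ▸ h1) dflt, hk]
  refine List.map_congr_left (fun k _ => ?_)
  rw [PySem.Dict.getD_eq_get?_getD, PySem.Dict.getD_eq_get?_getD, hg]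

-- dedup absorption: re-folding a built dict's items into d equals folding the raw pairs
lemma update_items_update (qs : List (String × List String))
    (d : PySem.Dict String (List String)) (hd : d.keys.Nodup) :
    d.update ((PySem.Dict.empty.update qs)).items = d.update qs := by
  have hnd : ((PySem.Dict.empty : PySem.Dict String (List String)).update qs).keys.Nodup :=
    nodup_keys_update' qs _ (by simp [PySem.Dict.keys_empty])
  refine dict_ext_of _ _ [] (nodup_keys_update' _ _ hd) ?_ ?_
  · rw [keys_update, keys_update]
    have hkeys : ((PySem.Dict.empty : PySem.Dict String (List String)).update qs).items.map (·.1)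
        = PySem.Set.ofList (qs.map (·.1)) := by
      have := keys_update qs (PySem.Dict.empty : PySem.Dict String (List String))
      simpa [PySem.Dict.keys, PySem.Dict.keys_empty, PySem.Set.update_nil_left] using this
    rw [show ((PySem.Dict.empty : PySem.Dict String (List String)).update qs).items.map (fun p => p.1)
        = PySem.Set.ofList (qs.map (·.1)) from hkeys,
      PySem.Set.update_eq_append_filter, PySem.Set.update_eq_append_filter,
      PySem.Set.ofList_ofList]
  · intro j
    rw [get?_update, get?_update, lookLast_items _ hnd j, get?_update]
    simp [PySem.Dict.get?_empty]

lemma update_append {ν : Type} (a b : List (String × ν)) (d : PySem.Dict String ν) :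
    d.update (a ++ b) = (d.update a).update b := by
  simp [PySem.Dict.update, List.foldl_append]

-- B's divide-and-conquer equals folding the flat pair list into the empty dict
lemma bcp_eq_flat (l : List (String × Int)) (n : Int) :
    bcpBuild l n = PySem.Dict.empty.update (flatPairs l n) := by
  induction l, n using bcpBuild.induct with
  | case1 n => rw [bcpBuild]; rfl
  | case2 p n => rw [bcpBuild]; rfl
  | case3 p1 p2 t n mid ih1 ih2 =>
      rw [bcpBuild, ih1, ih2,
        update_items_update _ _ (nodup_keys_update' _ _ (by simp [PySem.Dict.keys_empty])),
        ← update_append]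
      congr 1
      conv_rhs => rw [show (p1 :: p2 :: t) = ((p1 :: p2 :: t).take ((p1 :: p2 :: t).length / 2)
          ++ (p1 :: p2 :: t).drop ((p1 :: p2 :: t).length / 2)) from (List.take_append_drop _ _).symm]
      rw [flatPairs_append]

-- ===== VERDICT (by name: the statement is the Claim_ definition above) =====
theorem build_conformer_payload_py_spec : Claim_equal_build_conformer_payload_py := by
  intro sc _
  unfold Spec_build_conformer_payload_py build_conformer_payload_py build_conformer_payload_py_alt
  rw [A_loop_eq, bcp_eq_flat]
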